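-- pv_equiv track=rewrite | github.com/ROsinesss/BNU-old-raven | backend/utils/cas_des.py | get_key_bytes
-- ===== SOURCE A (Python) =====
-- def str_to_bt(s: str) -> list[int]:
--     """将字符串（<=4字符）转为 64-bit 数组"""
--     bt = [0] * 64
--     length = len(s)
--     for i in range(min(length, 4)):
--         k = ord(s[i])
--         for j in range(16):
--             pw = 1 << (15 - j)
--             bt[16 * i + j] = (k // pw) % 2
--     # 剩余位置填 0（已初始化）
--     return bt
--
-- def get_key_bytes(key: str) -> list[list[int]]:
--     """将密钥字符串拆成 4 字符一组，每组转 64-bit 数组"""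
--     key_bytes = []
--     length = len(key)
--     iterator = length // 4
--     remainder = length % 4
--     for i in range(iterator):
--         key_bytes.append(str_to_bt(key[i * 4: i * 4 + 4]))
--     if remainder > 0:
--         key_bytes.append(str_to_bt(key[iterator * 4: length]))
--     return key_bytes
-- ===== SOURCE B (Python) =====
-- def get_key_bytes(key: str) -> list[list[int]]:
--     """将密钥字符串拆成 4 字符一组，每组转 64-bit 数组"""
--     stream = []
--     for c in key:
--         k = ord(c)
--         stream += [(k >> (15 - j)) & 1 for j in range(16)]
--     stream += [0] * (-len(stream) % 64)
--     return [stream[i:i + 64] for i in range(0, len(stream), 64)]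
-- ===== Notes on version B (the rewrite author's own statement) =====
-- stated objective: alternative
-- what changed: Instead of A's per-chunk construction (iterator/remainder arithmetic, a separate str_to_bt call per group that index-writes bits into a preallocated 64-slot array), B builds one flat bitstream of all characters' 16 big-endian bits in a single pass, zero-pads it at the end to a multiple of 64, and reslices it into 64-element rows.
import Mathlib
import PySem

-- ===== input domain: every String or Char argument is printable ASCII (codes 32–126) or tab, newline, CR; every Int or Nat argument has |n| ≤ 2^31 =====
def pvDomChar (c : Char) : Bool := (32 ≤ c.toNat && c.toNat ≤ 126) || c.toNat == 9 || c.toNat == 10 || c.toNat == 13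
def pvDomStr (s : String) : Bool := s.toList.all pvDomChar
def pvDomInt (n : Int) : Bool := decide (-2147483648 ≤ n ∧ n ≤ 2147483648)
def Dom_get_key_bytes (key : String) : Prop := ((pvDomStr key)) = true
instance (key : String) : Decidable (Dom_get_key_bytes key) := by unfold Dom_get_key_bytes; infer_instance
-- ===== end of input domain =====

-- B builds ONE flat bitstream of the whole key, zero-pads it to a multiple of 64 at the end,
-- and reslices it into 64-bit rows — instead of A's per-chunk construction with
-- iterator/remainder arithmetic and an indexed 64-slot array per group; objective: alternative decomposition (same cost).

-- ===== PORT A =====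
-- str_to_bt of A, on the string's character list. range(n) for n ≥ 0 is List.range n;
-- s[i] with 0 ≤ i < len(s) is getD (the default is never read); k // pw and % 2 on
-- nonnegative operands are Nat division / mod (exact there).
def str_to_bt (s : List Char) : List Int :=
  let bt : List Int := List.replicate 64 0
  let length := s.length
  (List.range (min length 4)).foldl (fun bt i =>
    let k : Nat := (s.getD i ' ').toNat
    (List.range 16).foldl (fun bt j =>
      let pw : Nat := 1 <<< (15 - j)
      bt.set (16 * i + j) ((k / pw % 2 : Nat) : Int)) bt) bt

def get_key_bytes (key : String) : List (List Int) :=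
  let l := key.toList
  let length := l.length
  let iterator := length / 4
  let remainder := length % 4
  let key_bytes := (List.range iterator).foldl
    (fun acc i =>
      acc ++ [str_to_bt (PySem.List.slice l (some ((i * 4 : Nat) : Int)) (some ((i * 4 + 4 : Nat) : Int)))]) []
  if remainder > 0 then
    key_bytes ++ [str_to_bt (PySem.List.slice l (some ((iterator * 4 : Nat) : Int)) (some ((length : Nat) : Int)))]
  else key_bytes

-- ===== PORT B =====
-- Literal transliteration of Source B: the for-loop extending 'stream' with the 16 big-endian
-- bits of each character is a foldl; '-len(stream) % 64' is PySem.Int.mod (Python mod,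
-- nonnegative here, so .toNat is exact); range(0, len, 64) is pyRange; stream[i:i+64] is slice.
def get_key_bytes_alt (key : String) : List (List Int) :=
  let stream : List Int := key.toList.foldl (fun stream c =>
    let k : Nat := c.toNat
    stream ++ (List.range 16).map (fun j => (((k >>> (15 - j)) &&& 1 : Nat) : Int))) []
  let stream := stream ++ List.replicate ((PySem.Int.mod (-(stream.length : Int)) 64).toNat) (0 : Int)
  (PySem.List.pyRange 0 (stream.length : Int) 64).map (fun i =>
    PySem.List.slice stream (some i) (some (i + 64)))

-- ===== PRECONDITION & SPEC =====
def Spec_get_key_bytes (key : String) (out : List (List Int)) : Prop := out = get_key_bytes_alt key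
instance (key : String) (out : List (List Int)) : Decidable (Spec_get_key_bytes key out) := by unfold Spec_get_key_bytes; infer_instance

-- ===== CLAIM =====
def Claim_equal_get_key_bytes : Prop := ∀ (key : String), Dom_get_key_bytes key → Spec_get_key_bytes key (get_key_bytes key)

-- ===== LEMMAS AND PROOFS =====

-- the 16 big-endian bits of a character code (proof-side name for the list B builds per char)
def bits16 (c : Char) : List Int :=
  (List.range 16).map (fun j => (((c.toNat >>> (15 - j)) &&& 1 : Nat) : Int))

-- the 64-bit row both programs produce for one chunk of ≤ 4 characters
def chunkRow (cs : List Char) : List Int :=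
  cs.flatMap bits16 ++ List.replicate (64 - (cs.flatMap bits16).length) 0

-- a chunk of at most 4 characters: A's bit-setting loops produce the padded row
theorem chunk_eq (l : List Char) (h : l.length ≤ 4) : str_to_bt l = chunkRow l := by
  match l with
  | [] => simp [str_to_bt, chunkRow]
  | [a] => simp [str_to_bt, chunkRow, bits16, Nat.shiftRight_eq_div_pow, Nat.shiftLeft_eq, List.range_succ, List.set]
  | [a, b] => simp [str_to_bt, chunkRow, bits16, Nat.shiftRight_eq_div_pow, Nat.shiftLeft_eq, List.range_succ, List.set]
  | [a, b, c] => simp [str_to_bt, chunkRow, bits16, Nat.shiftRight_eq_div_pow, Nat.shiftLeft_eq, List.range_succ, List.set]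
  | [a, b, c, d] => simp [str_to_bt, chunkRow, bits16, Nat.shiftRight_eq_div_pow, Nat.shiftLeft_eq, List.range_succ, List.set]
  | a :: b :: c :: d :: e :: rest => simp at h; omega

theorem len_bits16 (c : Char) : (bits16 c).length = 16 := by simp [bits16]

theorem len_flat (l : List Char) : (l.flatMap bits16).length = 16 * l.length := by
  induction l with
  | nil => simp
  | cons c t ih => simp [List.flatMap_cons, ih, len_bits16]; ring

theorem flat_drop (m : Nat) : ∀ (l : List Char),
    (l.flatMap bits16).drop (16 * m) = (l.drop m).flatMap bits16 := by
  induction m with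
  | zero => simp
  | succ m ih =>
    intro l
    cases l with
    | nil => simp
    | cons c t =>
      rw [List.flatMap_cons, show 16 * (m + 1) = (bits16 c).length + 16 * m by rw [len_bits16]; ring,
        List.drop_append]
      have h1 : (bits16 c).length + 16 * m - (bits16 c).length = 16 * m := by omega
      have h2 : List.drop ((bits16 c).length + 16 * m) (bits16 c) = [] :=
        List.drop_eq_nil_of_le (by omega)
      rw [h1, h2, List.nil_append, ih t, List.drop_succ_cons]

theorem flat_take (m : Nat) : ∀ (l : List Char),
    (l.flatMap bits16).take (16 * m) = (l.take m).flatMap bits16 := by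
  induction m with
  | zero => simp
  | succ m ih =>
    intro l
    cases l with
    | nil => simp
    | cons c t =>
      rw [List.flatMap_cons, show 16 * (m + 1) = (bits16 c).length + 16 * m by rw [len_bits16]; ring,
        List.take_append]
      have h1 : (bits16 c).length + 16 * m - (bits16 c).length = 16 * m := by omega
      have h2 : List.take ((bits16 c).length + 16 * m) (bits16 c) = bits16 c :=
        List.take_of_length_le (by omega)
      rw [h1, h2, ih t, List.take_succ_cons, List.flatMap_cons]

-- the common middle form: rows of the chunking, one per ceil(len/4)
def rowsForm (l : List Char) : List (List Int) :=
  (List.range ((l.length + 3) / 4)).map (fun i => chunkRow ((l.drop (4 * i)).take 4))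

theorem A_eq (key : String) : get_key_bytes key = rowsForm key.toList := by
  simp only [get_key_bytes, rowsForm]
  generalize key.toList = l
  rw [PySem.List.foldl_append_singleton_eq_map, List.nil_append]
  rcases Nat.eq_zero_or_pos (l.length % 4) with hrem | hrem
  · rw [if_neg (by omega)]
    have hn : (l.length + 3) / 4 = l.length / 4 := by omega
    rw [hn]
    apply List.map_congr_left
    intro i hi
    rw [List.mem_range] at hi
    rw [PySem.List.slice_natCast]
    have : i * 4 + 4 - i * 4 = 4 := by omega
    rw [this, chunk_eq _ (by simp), Nat.mul_comm i 4]
  · rw [if_pos hrem]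
    have hn : (l.length + 3) / 4 = l.length / 4 + 1 := by omega
    rw [hn, List.range_succ, List.map_append]
    congr 1
    · apply List.map_congr_left
      intro i hi
      rw [List.mem_range] at hi
      rw [PySem.List.slice_natCast]
      have : i * 4 + 4 - i * 4 = 4 := by omega
      rw [this, chunk_eq _ (by simp), Nat.mul_comm i 4]
    · simp only [List.map_cons, List.map_nil, PySem.List.slice_natCast]
      rw [Nat.mul_comm (l.length / 4) 4]
      have h1 : List.take (l.length - 4 * (l.length / 4)) (List.drop (4 * (l.length / 4)) l) =
          List.drop (4 * (l.length / 4)) l :=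
        List.take_of_length_le (by simp)
      have h2 : List.take 4 (List.drop (4 * (l.length / 4)) l) = List.drop (4 * (l.length / 4)) l :=
        List.take_of_length_le (by simp; omega)
      rw [h1, h2, chunk_eq _ (by simp; omega)]

theorem B_eq (key : String) : get_key_bytes_alt key = rowsForm key.toList := by
  simp only [get_key_bytes_alt]
  generalize key.toList = l
  rw [show (fun (stream : List Int) (c : Char) =>
        stream ++ (List.range 16).map (fun j => (((c.toNat >>> (15 - j)) &&& 1 : Nat) : Int)))
      = (fun stream c => stream ++ bits16 c) from rfl,
    PySem.List.foldl_append_eq_flatMap, List.nil_append]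
  set n := l.length with hn
  set cl := (n + 3) / 4 with hcl
  have hflat : (l.flatMap bits16).length = 16 * n := len_flat l
  have hpad : ((PySem.Int.mod (-((l.flatMap bits16).length : Int)) 64).toNat) = 64 * cl - 16 * n := by
    rw [hflat, PySem.Int.mod_eq_emod_of_pos (by omega)]
    omega
  rw [hpad]
  have hlen' : ((l.flatMap bits16) ++ List.replicate (64 * cl - 16 * n) (0 : Int)).length = 64 * cl := by
    simp [hflat]; omega
  rw [hlen', PySem.List.pyRange_of_pos 0 ((64 * cl : Nat) : Int) (by omega), List.map_map]
  have hcount : (if (0 : Int) < ((64 * cl : Nat) : Int) then ((((64 * cl : Nat) : Int) - 0 + 64 - 1) / 64).toNat else 0) = cl := by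
    split_ifs with h <;> omega
  rw [hcount]
  unfold rowsForm
  rw [← hn, ← hcl]
  apply List.map_congr_left
  intro i hi
  rw [List.mem_range] at hi
  simp only [Function.comp]
  have hidx : (0 : Int) + 64 * (i : Int) = ((64 * i : Nat) : Int) := by push_cast; ring
  have hidx2 : (0 : Int) + 64 * (i : Int) + 64 = ((64 * i : Nat) : Int) + ((64 : Nat) : Int) := by push_cast; ring
  rw [hidx2, hidx, PySem.List.slice_natCast_add]
  have h4i : 4 * i ≤ n := by omega
  have hdrop : List.drop (64 * i) ((l.flatMap bits16) ++ List.replicate (64 * cl - 16 * n) (0 : Int))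
      = (l.drop (4 * i)).flatMap bits16 ++ List.replicate (64 * cl - 16 * n) (0 : Int) := by
    rw [List.drop_append_of_le_length (by rw [hflat]; omega),
      show 64 * i = 16 * (4 * i) by ring, flat_drop]
  rw [hdrop]
  have hdlen : ((l.drop (4 * i)).flatMap bits16).length = 16 * (n - 4 * i) := by
    rw [len_flat, List.length_drop, ← hn]
  by_cases hfull : 4 * i + 4 ≤ n
  · -- full chunk: the 64 bits come entirely from the stream
    rw [List.take_append_of_le_length (by omega),
      show (64 : Nat) = 16 * 4 from rfl, flat_take]
    unfold chunkRow
    have : ((l.drop (4 * i)).take 4).length = 4 := by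
      rw [List.length_take, List.length_drop, ← hn]; omega
    rw [len_flat, this]
    simp
  · -- last, partial chunk: the whole remainder plus the zero pad
    have hd4 : (l.drop (4 * i)).take 4 = l.drop (4 * i) :=
      List.take_of_length_le (by rw [List.length_drop, ← hn]; omega)
    have hcl1 : cl = i + 1 := by omega
    have htot : ((l.drop (4 * i)).flatMap bits16 ++ List.replicate (64 * cl - 16 * n) (0 : Int)).length = 64 := by
      simp only [List.length_append, List.length_replicate, hdlen]; omega
    rw [List.take_of_length_le (by rw [htot]), hd4]
    unfold chunkRow
    have hrep : 64 * cl - 16 * n = 64 - ((l.drop (4 * i)).flatMap bits16).length := by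
      rw [hdlen]; omega
    rw [hrep]

-- ===== VERDICT =====
theorem get_key_bytes_spec : Claim_equal_get_key_bytes := by
  intro key _
  unfold Spec_get_key_bytes
  rw [A_eq, B_eq]
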